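-- pv_equiv track=rewrite | github.com/Cone-Virus/TinyStinger-2.0 | src/scanner.py | clean_spider
-- ===== SOURCE A (Python) =====
-- def clean_spider(spider_list):
--     check = True
--     trash_list = ["text/css","text/html","prev/next","text/css","image/jpeg","image/webp","image/png","mm/dd/yy","text/plain","text/javascript","text/xml","application/json","application/x-www-form-urlencoded","image/gif","mm/yy/dd"]
--     clean_list = []
--     cleaner_list = []
--     for row in spider_list:
--         for end in trash_list:
--             if row.endswith(end):
--                 check = False
--         if check:
--             clean_list.append(row)
--         check = True
--
--     for row in clean_list:
--         if row not in trash_list: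
--             if not (row.startswith("./") or row.startswith("../")):
--                 cleaner_list.append(row)
--
--     return cleaner_list
-- ===== SOURCE B (Python) =====
-- def clean_spider(spider_list):
--     trash_list = ["text/css","text/html","prev/next","text/css","image/jpeg","image/webp","image/png","mm/dd/yy","text/plain","text/javascript","text/xml","application/json","application/x-www-form-urlencoded","image/gif","mm/yy/dd"]
--     # index the trash suffixes by length once: a suffix match of row against the
--     # whole list becomes a hash-set lookup of row's last k characters per distinct length
--     by_len = {}
--     for t in trash_list:
--         by_len.setdefault(len(t), set()).add(t)
--     result = []
--     for row in spider_list: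
--         n = len(row)
--         if row[:2] == "./" or row[:3] == "../":
--             continue
--         if any(k <= n and row[n - k:] in group for k, group in by_len.items()):
--             continue
--         result.append(row)
--     return result
-- ===== Notes on version B (the rewrite author's own statement) =====
-- stated objective: faster
-- what changed: Replaces A's two staged list-building passes (flag-based endswith scan over all 15 trash entries per row, then a membership+prefix re-filter) by a length-indexed hash structure: the trash suffixes are grouped once into a dict {length -> set of suffixes}, and each row is decided by slicing off its last k characters per distinct length (6 of them) and a set lookup, plus direct prefix slices; the redundant 'row not in trash_list' test disappears.
import Mathlib
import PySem

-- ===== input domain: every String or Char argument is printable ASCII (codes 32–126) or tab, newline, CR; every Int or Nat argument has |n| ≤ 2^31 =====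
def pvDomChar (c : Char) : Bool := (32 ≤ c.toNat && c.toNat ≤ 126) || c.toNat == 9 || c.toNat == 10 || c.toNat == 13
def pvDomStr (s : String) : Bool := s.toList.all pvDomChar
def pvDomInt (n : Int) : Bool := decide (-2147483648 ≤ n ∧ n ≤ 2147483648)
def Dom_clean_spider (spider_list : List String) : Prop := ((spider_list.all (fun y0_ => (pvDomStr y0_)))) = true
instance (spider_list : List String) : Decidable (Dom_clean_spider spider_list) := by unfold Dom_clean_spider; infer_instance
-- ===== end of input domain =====

-- B groups the trash suffixes by length into a dict of sets built once, and decides each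
-- row by slicing its last k characters per distinct length and a set lookup (objective: faster,
-- measured: per row, 6 hash lookups instead of 15 endswith scans).

def pvTrash : List String := ["text/css","text/html","prev/next","text/css","image/jpeg","image/webp","image/png","mm/dd/yy","text/plain","text/javascript","text/xml","application/json","application/x-www-form-urlencoded","image/gif","mm/yy/dd"]

-- ===== PORT A =====
-- first loop: state (check, clean_list); check is set False by any matching suffix, reset to True after each row
def clean_spider (spider_list : List String) : List String :=
  let st := spider_list.foldl
    (fun (st : Bool × List String) row =>
      let check := pvTrash.foldl (fun c e => if PySem.Str.endswith row e then false else c) st.1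
      let clean := if check then st.2 ++ [row] else st.2
      (true, clean)) (true, [])
  st.2.foldl
    (fun acc row =>
      if ¬ (row ∈ pvTrash) then
        if ¬ (PySem.Str.startswith row "./" || PySem.Str.startswith row "../") then acc ++ [row]
        else acc
      else acc) []

-- ===== PORT B =====
-- by_len = {} ; for t in trash_list: by_len.setdefault(len(t), set()).add(t)
-- (setdefault-then-add = insert of the updated set at the key's position; new keys append: Dict.insert)
def pvByLen : PySem.Dict Int (PySem.Set String) :=
  pvTrash.foldl
    (fun d t => d.insert (PySem.Str.len t)
      (PySem.Set.add (d.getD (PySem.Str.len t) PySem.Set.empty) t))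
    PySem.Dict.empty

-- loop with 'continue's; row[:2] / row[:3] / row[n-k:] are Str.slice (n-k ≥ 0 under the k ≤ n guard)
def clean_spider_alt (spider_list : List String) : List String :=
  spider_list.foldl
    (fun acc row =>
      if PySem.Str.slice row none (some 2) = "./" ∨ PySem.Str.slice row none (some 3) = "../" then acc
      else if pvByLen.items.any
          (fun kg => decide (kg.1 ≤ PySem.Str.len row) &&
            PySem.Set.contains kg.2 (PySem.Str.slice row (some (PySem.Str.len row - kg.1)) none)) then acc
      else acc ++ [row]) []

-- ===== PRECONDITION & SPEC =====
def Spec_clean_spider (spider_list : List String) (out : List String) : Prop := out = clean_spider_alt spider_list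
instance (spider_list : List String) (out : List String) : Decidable (Spec_clean_spider spider_list out) := by unfold Spec_clean_spider; infer_instance

-- ===== CLAIM =====
def Claim_equal_clean_spider : Prop := ∀ (spider_list : List String), Dom_clean_spider spider_list → Spec_clean_spider spider_list (clean_spider spider_list)

-- ===== LEMMAS AND PROOFS =====

-- the inner check loop computes '¬ any suffix matches'
theorem check_loop_eq {α : Type} (p : α → Bool) (l : List α) (c : Bool) :
    l.foldl (fun c e => if p e then false else c) c = (c && !(l.any p)) := by
  induction l generalizing c with
  | nil => simp
  | cons h t ih =>
    simp only [List.foldl_cons, List.any_cons, ih]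
    cases hh : p h <;> simp

-- generic shape of the first loop once check is expressed as '!any'
theorem first_loop_aux (p : String → Bool) (l acc : List String) :
    l.foldl (fun (st : Bool × List String) row =>
        (true, if st.1 && p row then st.2 ++ [row] else st.2)) (true, acc)
      = (true, acc ++ l.filter p) := by
  induction l generalizing acc with
  | nil => simp
  | cons h t ih =>
    simp only [List.foldl_cons, Bool.true_and, List.filter_cons]
    cases hh : p h
    · rw [if_neg Bool.false_ne_true, if_neg Bool.false_ne_true]
      exact ih acc
    · rw [if_pos rfl, if_pos rfl, ih]
      simp

-- the first loop of A is a filter (check always re-enters true)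
theorem first_loop_eq (spider_list : List String) (acc : List String) :
    (spider_list.foldl
      (fun (st : Bool × List String) row =>
        let check := pvTrash.foldl (fun c e => if PySem.Str.endswith row e then false else c) st.1
        let clean := if check then st.2 ++ [row] else st.2
        (true, clean)) (true, acc))
    = (true, acc ++ spider_list.filter (fun row => !(pvTrash.any (fun e => PySem.Str.endswith row e)))) := by
  have hb : (fun (st : Bool × List String) row =>
        let check := pvTrash.foldl (fun c e => if PySem.Str.endswith row e then false else c) st.1
        let clean := if check then st.2 ++ [row] else st.2
        (true, clean))
      = (fun (st : Bool × List String) row =>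
        (true, if st.1 && !(pvTrash.any (fun e => PySem.Str.endswith row e)) then st.2 ++ [row] else st.2)) := by
    funext st row
    simp only [check_loop_eq]
  rw [hb, first_loop_aux]

-- a string ending with no trash suffix is not itself a trash entry
theorem not_mem_trash {row : String}
    (h : (pvTrash.any (fun e => PySem.Str.endswith row e)) = false) : row ∉ pvTrash := by
  intro hmem
  have : PySem.Str.endswith row row = true := by
    simp [PySem.Chars.endswith_iff]
  have := List.any_eq_false.mp h row hmem
  simp_all

-- the second loop of A is a filter
theorem second_loop_eq (l acc : List String) :
    l.foldl
      (fun acc row =>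
        if ¬ (row ∈ pvTrash) then
          if ¬ (PySem.Str.startswith row "./" || PySem.Str.startswith row "../") then acc ++ [row]
          else acc
        else acc) acc
    = acc ++ l.filter (fun row =>
        !(decide (row ∈ pvTrash)) &&
        !(PySem.Str.startswith row "./" || PySem.Str.startswith row "../")) := by
  induction l generalizing acc with
  | nil => simp
  | cons h t ih =>
    simp only [List.foldl_cons, List.filter_cons, ih]
    by_cases h1 : h ∈ pvTrash
    · simp [h1]
    · cases h2 : (PySem.Str.startswith h "./" || PySem.Str.startswith h "../") <;>
        · simp [h1]

-- slicing the tail and comparing = endswith  (k = |e|)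
theorem entry_iff (row e : String) (k : Int) (hk : (e.length : Int) = k) :
    (k ≤ PySem.Str.len row ∧
      PySem.Str.slice row (some (PySem.Str.len row - k)) none = e)
      ↔ PySem.Str.endswith row e = true := by
  subst hk
  have hlen : PySem.Str.len row = (row.length : Int) := by simp [PySem.Str.len]
  rw [PySem.Str.endswith_eq, PySem.Chars.endswith_iff, List.suffix_iff_eq_drop, hlen]
  constructor
  · rintro ⟨h1, h2⟩
    have h1' : e.length ≤ row.length := by exact_mod_cast h1
    have h3 := congrArg String.toList h2
    rw [PySem.Str.toList_slice, PySem.Chars.slice_eq_listSlice,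
        PySem.List.slice_from _ (by omega : (0:Int) ≤ (row.length : Int) - (e.length : Int))] at h3
    have htn : ((row.length : Int) - (e.length : Int)).toNat = row.length - e.length := by omega
    rw [htn] at h3
    simp only [String.length_toList]
    exact h3.symm
  · intro h
    have hle : e.length ≤ row.length := by
      have := congrArg List.length h
      simp only [String.length_toList, List.length_drop] at this
      omega
    refine ⟨by exact_mod_cast hle, ?_⟩
    apply String.toList_injective
    rw [PySem.Str.toList_slice, PySem.Chars.slice_eq_listSlice,
        PySem.List.slice_from _ (by omega : (0:Int) ≤ (row.length : Int) - (e.length : Int))]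
    have htn : ((row.length : Int) - (e.length : Int)).toNat = row.length - e.length := by omega
    rw [htn]
    simp only [String.length_toList] at h
    exact h.symm

-- take-k slice comparison = startswith  (k = |p|)
theorem prefix_iff (row p : String) (k : Int) (hk : (p.length : Int) = k) :
    PySem.Str.slice row none (some k) = p ↔ PySem.Str.startswith row p = true := by
  subst hk
  rw [PySem.Str.startswith_eq, PySem.Chars.startswith_iff, List.prefix_iff_eq_take]
  constructor
  · intro h
    have h3 := congrArg String.toList h
    rw [PySem.Str.toList_slice, PySem.Chars.slice_eq_listSlice,
        PySem.List.slice_to _ (by positivity : (0:Int) ≤ (p.length : Int))] at h3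
    simp only [Int.toNat_natCast, String.length_toList] at h3 ⊢
    exact h3.symm
  · intro h
    apply String.toList_injective
    rw [PySem.Str.toList_slice, PySem.Chars.slice_eq_listSlice,
        PySem.List.slice_to _ (by positivity : (0:Int) ≤ (p.length : Int))]
    simp only [Int.toNat_natCast, String.length_toList] at h ⊢
    exact h.symm

-- the grouping dict evaluated (insertion order)
set_option maxHeartbeats 1000000 in
set_option maxHeartbeats 2000000 in
theorem pvByLen_items : pvByLen.items =
    [(8, ["text/css", "mm/dd/yy", "text/xml", "mm/yy/dd"]),
     (9, ["text/html", "prev/next", "image/png", "image/gif"]),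
     (10, ["image/jpeg", "image/webp", "text/plain"]),
     (15, ["text/javascript"]),
     (16, ["application/json"]),
     (33, ["application/x-www-form-urlencoded"])] := by
  with_unfolding_all rfl

-- the hash lookup over by_len equals A's endswith scan over trash_list
theorem hash_eq_any (row : String) :
    (pvByLen.items.any
      (fun kg => decide (kg.1 ≤ PySem.Str.len row) &&
        PySem.Set.contains kg.2
          (PySem.Str.slice row (some (PySem.Str.len row - kg.1)) none)))
      = pvTrash.any (fun e => PySem.Str.endswith row e) := by
  rw [Bool.eq_iff_iff]
  simp only [pvByLen_items, pvTrash, List.any_cons, List.any_nil, Bool.or_eq_true,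
    Bool.and_eq_true, decide_eq_true_eq, PySem.Set.contains, List.contains_eq_mem,
    List.mem_cons, List.not_mem_nil, or_false, and_or_left]
  rw [entry_iff row "text/css" 8 (by decide), entry_iff row "mm/dd/yy" 8 (by decide),
      entry_iff row "text/xml" 8 (by decide), entry_iff row "mm/yy/dd" 8 (by decide),
      entry_iff row "text/html" 9 (by decide), entry_iff row "prev/next" 9 (by decide),
      entry_iff row "image/png" 9 (by decide), entry_iff row "image/gif" 9 (by decide),
      entry_iff row "image/jpeg" 10 (by decide), entry_iff row "image/webp" 10 (by decide),
      entry_iff row "text/plain" 10 (by decide), entry_iff row "text/javascript" 15 (by decide),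
      entry_iff row "application/json" 16 (by decide),
      entry_iff row "application/x-www-form-urlencoded" 33 (by decide)]
  by_cases q1 : PySem.Str.endswith row "text/css" = true
  · simp only [q1, true_or, or_true]
  by_cases q2 : PySem.Str.endswith row "mm/dd/yy" = true
  · simp only [q2, true_or, or_true]
  by_cases q3 : PySem.Str.endswith row "text/xml" = true
  · simp only [q3, true_or, or_true]
  by_cases q4 : PySem.Str.endswith row "mm/yy/dd" = true
  · simp only [q4, true_or, or_true]
  by_cases q5 : PySem.Str.endswith row "text/html" = true
  · simp only [q5, true_or, or_true]
  by_cases q6 : PySem.Str.endswith row "prev/next" = true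
  · simp only [q6, true_or, or_true]
  by_cases q7 : PySem.Str.endswith row "image/png" = true
  · simp only [q7, true_or, or_true]
  by_cases q8 : PySem.Str.endswith row "image/gif" = true
  · simp only [q8, true_or, or_true]
  by_cases q9 : PySem.Str.endswith row "image/jpeg" = true
  · simp only [q9, true_or, or_true]
  by_cases q10 : PySem.Str.endswith row "image/webp" = true
  · simp only [q10, true_or, or_true]
  by_cases q11 : PySem.Str.endswith row "text/plain" = true
  · simp only [q11, true_or, or_true]
  by_cases q12 : PySem.Str.endswith row "text/javascript" = true
  · simp only [q12, true_or, or_true]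
  by_cases q13 : PySem.Str.endswith row "application/json" = true
  · simp only [q13, true_or, or_true]
  by_cases q14 : PySem.Str.endswith row "application/x-www-form-urlencoded" = true
  · simp only [q14, true_or, or_true]
  simp only [q1, q2, q3, q4, q5, q6, q7, q8, q9, q10, q11, q12, q13, q14, or_self]

-- B's loop is a filter
theorem b_loop_eq (l acc : List String) :
    l.foldl
      (fun acc row =>
        if PySem.Str.slice row none (some 2) = "./" ∨ PySem.Str.slice row none (some 3) = "../" then acc
        else if pvByLen.items.any
            (fun kg => decide (kg.1 ≤ PySem.Str.len row) &&
              PySem.Set.contains kg.2 (PySem.Str.slice row (some (PySem.Str.len row - kg.1)) none)) then acc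
        else acc ++ [row]) acc
    = acc ++ l.filter (fun row =>
        !(decide (PySem.Str.slice row none (some 2) = "./" ∨ PySem.Str.slice row none (some 3) = "../")) &&
        !(pvByLen.items.any
            (fun kg => decide (kg.1 ≤ PySem.Str.len row) &&
              PySem.Set.contains kg.2 (PySem.Str.slice row (some (PySem.Str.len row - kg.1)) none)))) := by
  induction l generalizing acc with
  | nil => simp
  | cons h t ih =>
    simp only [List.foldl_cons, List.filter_cons]
    by_cases h1 : PySem.Str.slice h none (some 2) = "./" ∨ PySem.Str.slice h none (some 3) = "../"
    · simp only [h1, if_true, decide_true, Bool.not_true, Bool.false_and, Bool.false_eq_true,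
        if_false, ih]
    · cases h2 : pvByLen.items.any
          (fun kg => decide (kg.1 ≤ PySem.Str.len h) &&
            PySem.Set.contains kg.2 (PySem.Str.slice h (some (PySem.Str.len h - kg.1)) none))
      · simp only [h1, if_false, decide_false, Bool.not_false, Bool.true_and,
          Bool.false_eq_true, if_false, ih]
        simp
      · simp only [h1, decide_false, Bool.not_false, Bool.true_and, Bool.not_true,
          Bool.false_eq_true, if_true, if_false, ih]

-- ===== VERDICT =====
theorem clean_spider_spec : Claim_equal_clean_spider := by
  intro spider_list _
  unfold Spec_clean_spider clean_spider clean_spider_alt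
  simp only [first_loop_eq, List.nil_append, second_loop_eq, b_loop_eq, List.filter_filter]
  apply List.filter_congr
  intro row _
  rw [hash_eq_any]
  have hp2 := prefix_iff row "./" 2 (by decide)
  have hp3 := prefix_iff row "../" 3 (by decide)
  cases hs : (pvTrash.any (fun e => PySem.Str.endswith row e))
  · have hnm := not_mem_trash hs
    by_cases h2 : PySem.Str.slice row none (some 2) = "./" <;>
      by_cases h3 : PySem.Str.slice row none (some 3) = "../" <;>
      simp_all
  · simp
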